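-- pv_equiv track=rewrite | github.com/ximenaSilvaa/Computational-Methods | Programming a DFA /final.py | is_operator
-- ===== SOURCE A (Python) =====
-- def is_operator(token):
--     alphabet = {'operator'}
--     transition_table = {
--         'q0': {'operator': 'q1'},
--         'q1': {'operator': 'q2'},
--         'q2': {'operator': 'q2'}
--     }
--
--     current_state = 'q0'
--     final_states = {'q1'}
--     for char in token:
--         if char in '=+-*/^':
--             input_type = 'operator'
--         else:
--             return False
--         current_state = transition_table[current_state].get(input_type, 'q2')
--
--     return current_state in final_states
-- ===== SOURCE B (Python) =====
-- def is_operator(token):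
--     chars = list(token)
--     return len(chars) == 1 and chars[0] in '=+-*/^'
-- ===== Notes on version B (the rewrite author's own statement) =====
-- stated objective: simpler
-- what changed: Replaced the DFA transition table and state loop with a closed-form check: the token is accepted iff it is exactly one operator character (length-1 and membership test).
import Mathlib
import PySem

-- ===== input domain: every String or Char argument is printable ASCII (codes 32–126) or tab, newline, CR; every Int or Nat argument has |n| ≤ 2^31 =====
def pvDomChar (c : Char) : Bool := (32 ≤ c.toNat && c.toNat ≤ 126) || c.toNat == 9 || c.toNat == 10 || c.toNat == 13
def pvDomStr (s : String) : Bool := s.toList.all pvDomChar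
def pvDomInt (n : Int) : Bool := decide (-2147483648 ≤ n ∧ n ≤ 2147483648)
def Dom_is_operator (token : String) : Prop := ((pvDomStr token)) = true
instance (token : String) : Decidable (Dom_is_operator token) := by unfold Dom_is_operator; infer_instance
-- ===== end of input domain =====

-- B replaces A's DFA transition table and state loop with a closed-form "exactly one
-- operator character" check (objective: simpler).


-- ===== PORT A =====
-- transition_table[current_state].get('operator', 'q2')
def isOpTransition (state : String) : String :=
  if state = "q0" then "q1"
  else if state = "q1" then "q2"
  else if state = "q2" then "q2"
  else "q2"

-- the for-loop with its early `return False`; final `current_state in {'q1'}`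
def isOpLoop (state : String) (chars : List Char) : Bool :=
  match chars with
  | [] => state = "q1"
  | c :: rest =>
      if c ∈ "=+-*/^".toList then
        isOpLoop (isOpTransition state) rest
      else
        false

def is_operator (token : String) : Bool :=
  isOpLoop "q0" token.toList

-- ===== PORT B =====
def is_operator_alt (token : String) : Bool :=
  let chars := token.toList
  chars.length = 1 && decide (chars.headI ∈ "=+-*/^".toList)

-- ===== PRECONDITION & SPEC =====
def Spec_is_operator (token : String) (out : Bool) : Prop := out = is_operator_alt token
instance (token : String) (out : Bool) : Decidable (Spec_is_operator token out) := by unfold Spec_is_operator; infer_instance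

-- ===== CLAIM (what is proved, stated in full; the proofs are below) =====
def Claim_equal_is_operator : Prop := ∀ (token : String), Dom_is_operator token → Spec_is_operator token (is_operator token)

-- ===== LEMMAS AND PROOFS =====
-- Once in state q2 the loop can never accept: it either returns False on a
-- non-operator char or ends in the non-final state q2.
theorem isOpLoop_q2 (chars : List Char) : isOpLoop "q2" chars = false := by
  induction chars with
  | nil => simp [isOpLoop]
  | cons c rest ih => simp [isOpLoop, isOpTransition]; intro _; exact ih

-- ===== VERDICT (by name: the statement is the Claim_ definition above) =====
theorem is_operator_spec : Claim_equal_is_operator := by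
  intro token _
  unfold Spec_is_operator is_operator is_operator_alt
  match h : token.toList with
  | [] => simp [isOpLoop]
  | [c] =>
      simp [isOpLoop, isOpTransition]
  | c :: d :: rest =>
      simp [isOpLoop, isOpTransition]
      intro _ _
      exact isOpLoop_q2 rest
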